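-- pv_equiv track=rewrite | github.com/142857why/Leetcode-python | 6035-number-of-ways-to-select-buildings.py | numberOfWays
-- ===== SOURCE A (Python) =====
-- def numberOfWays(s: str) -> int:
--     def numDistinct(s: str, t: str) -> int:
--         # dp = [[0]*(len(s)+1)] * (len(t)+1)  # 初始化dp数组，加上两行空数组的情况
--         dp = [[0] * (len(s) + 1) for _ in range(len(t) + 1)]
--         for i in range(len(s) + 1):  # 空集是任意集合的子集  第一行赋值1
--             dp[0][i] = 1
--
--         for i in range(1, len(t) + 1):  # 控制行
--             for j in range(1, len(s) + 1):  # 控制列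
--                 if s[j - 1] == t[i - 1]:
--                     dp[i][j] = dp[i - 1][j - 1] + dp[i][j - 1]
--                 else:
--                     dp[i][j] = dp[i][j - 1]
--         return dp[-1][-1]
--
--     ans = numDistinct(s, '010') + numDistinct(s, '101')
--     return ans
-- ===== SOURCE B (Python) =====
-- def numberOfWays(s: str) -> int:
--     # Single pass with six running subsequence counters instead of two 2D DP tables.
--     c0 = c1 = c01 = c10 = c010 = c101 = 0
--     for ch in s:
--         if ch == '0':
--             c010 += c01
--             c10 += c1
--             c0 += 1
--         elif ch == '1':
--             c101 += c10
--             c01 += c0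
--             c1 += 1
--     return c010 + c101
-- ===== Notes on version B (the rewrite author's own statement) =====
-- stated objective: faster
-- what changed: Replaces the two (len(t)+1)x(len(s)+1) dynamic-programming tables (one numDistinct call per pattern) by a single left-to-right pass over s maintaining six O(1) running counters of the subsequences 0,1,01,10,010,101.
import Mathlib
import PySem

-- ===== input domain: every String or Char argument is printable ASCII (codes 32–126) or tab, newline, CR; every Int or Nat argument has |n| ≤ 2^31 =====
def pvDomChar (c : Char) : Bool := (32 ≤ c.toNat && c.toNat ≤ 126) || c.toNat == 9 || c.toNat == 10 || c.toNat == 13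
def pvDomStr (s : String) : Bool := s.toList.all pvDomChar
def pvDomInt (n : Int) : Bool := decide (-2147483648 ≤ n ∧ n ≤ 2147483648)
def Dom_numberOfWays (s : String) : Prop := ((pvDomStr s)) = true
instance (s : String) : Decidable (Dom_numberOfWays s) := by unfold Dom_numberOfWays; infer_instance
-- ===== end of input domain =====

-- B replaces A's two (len t+1)×(len s+1) DP tables by one pass over s with six running counters (same O(n) time, O(1) space).

-- ===== PORT A =====
-- dp[i][j] read/write helpers; all indices used by A are in range (loop indices are nonnegative, dp[-1][-1] via pyGet?).
def pvGetRC (dp : List (List Int)) (i j : Int) : Int :=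
  (PySem.List.pyGet? ((PySem.List.pyGet? dp i).getD []) j).getD 0

def pvSetRC (dp : List (List Int)) (i j : Int) (v : Int) : List (List Int) :=
  dp.set i.toNat (((PySem.List.pyGet? dp i).getD []).set j.toNat v)

-- literal port of the nested helper numDistinct
def pvNumDistinct (s t : String) : Int :=
  let dp0 : List (List Int) :=
    (PySem.List.pyRange 0 (PySem.Str.len t + 1) 1).map
      (fun _ => List.replicate (s.toList.length + 1) (0 : Int))
  let dp1 := (PySem.List.pyRange 0 (PySem.Str.len s + 1) 1).foldl
      (fun dp i => pvSetRC dp 0 i 1) dp0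
  let dp2 := (PySem.List.pyRange 1 (PySem.Str.len t + 1) 1).foldl
      (fun dp i =>
        (PySem.List.pyRange 1 (PySem.Str.len s + 1) 1).foldl
          (fun dp j =>
            if PySem.Str.pyGet? s (j - 1) = PySem.Str.pyGet? t (i - 1) then
              pvSetRC dp i j (pvGetRC dp (i - 1) (j - 1) + pvGetRC dp i (j - 1))
            else
              pvSetRC dp i j (pvGetRC dp i (j - 1)))
          dp) dp1
  pvGetRC dp2 (-1) (-1)

def numberOfWays (s : String) : Int :=
  pvNumDistinct s "010" + pvNumDistinct s "101"

-- ===== PORT B =====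
def pvStep (st : Int × Int × Int × Int × Int × Int) (ch : Char) :
    Int × Int × Int × Int × Int × Int :=
  match st with
  | (c0, c1, c01, c10, c010, c101) =>
    if ch = '0' then (c0 + 1, c1, c01, c10 + c1, c010 + c01, c101)
    else if ch = '1' then (c0, c1 + 1, c01 + c0, c10, c010, c101 + c10)
    else st

def numberOfWays_alt (s : String) : Int :=
  let st := s.toList.foldl pvStep (0, 0, 0, 0, 0, 0)
  st.2.2.2.2.1 + st.2.2.2.2.2

-- ===== PRECONDITION & SPEC =====
def Spec_numberOfWays (s : String) (out : Int) : Prop := out = numberOfWays_alt s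
instance (s : String) (out : Int) : Decidable (Spec_numberOfWays s out) := by unfold Spec_numberOfWays; infer_instance

-- ===== CLAIM (what is proved, stated in full; the proofs are below) =====
def Claim_equal_numberOfWays : Prop := ∀ (s : String), Dom_numberOfWays s → Spec_numberOfWays s (numberOfWays s)

-- ===== LEMMAS AND PROOFS =====

-- Number of occurrences of a pattern, extended by one trailing char tc, as a
-- subsequence of a REVERSED prefix (head = most recent char).
def pvNext (f : List Char → Int) (tc : Char) : List Char → Int
  | [] => 0
  | x :: r => pvNext f tc r + (if x = tc then f r else 0)

def pvOne : List Char → Int := fun _ => 1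
def pvCnt1 (a : Char) : List Char → Int := pvNext pvOne a
def pvCnt2 (a b : Char) : List Char → Int := pvNext (pvCnt1 a) b
def pvCnt3 (a b c : Char) : List Char → Int := pvNext (pvCnt2 a b) c

-- B invariant
def pvBState (r : List Char) : Int × Int × Int × Int × Int × Int :=
  (pvCnt1 '0' r, pvCnt1 '1' r, pvCnt2 '0' '1' r, pvCnt2 '1' '0' r,
   pvCnt3 '0' '1' '0' r, pvCnt3 '1' '0' '1' r)

lemma pvStep_state (r : List Char) (x : Char) :
    pvStep (pvBState r) x = pvBState (x :: r) := by
  by_cases h0 : x = '0'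
  · subst h0
    simp [pvStep, pvBState, pvCnt1, pvCnt2, pvCnt3, pvNext, pvOne]
  · by_cases h1 : x = '1'
    · subst h1
      simp [pvStep, pvBState, pvCnt1, pvCnt2, pvCnt3, pvNext, pvOne]
    · simp [pvStep, pvBState, pvCnt1, pvCnt2, pvCnt3, pvNext, h0, h1]

lemma pvB_fold (l r : List Char) :
    l.foldl pvStep (pvBState r) = pvBState (l.reverse ++ r) := by
  induction l generalizing r with
  | nil => simp
  | cons x l ih =>
      simp only [List.foldl_cons, pvStep_state, List.reverse_cons, List.append_assoc,
        List.singleton_append]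
      exact ih (x :: r)

lemma pvB_val (s : String) :
    numberOfWays_alt s =
      pvCnt3 '0' '1' '0' s.toList.reverse + pvCnt3 '1' '0' '1' s.toList.reverse := by
  have h : List.foldl pvStep ((0, 0, 0, 0, 0, 0) : Int × Int × Int × Int × Int × Int)
      s.toList = pvBState s.toList.reverse := by
    have hinit : ((0, 0, 0, 0, 0, 0) : Int × Int × Int × Int × Int × Int) = pvBState [] := by
      simp [pvBState, pvCnt1, pvCnt2, pvCnt3, pvNext]
    rw [hinit]
    simpa using pvB_fold s.toList []
  rw [numberOfWays_alt]
  simp only [h, pvBState]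

-- the j-th column value of the row for pattern-count f on string cs
def pvRowOf (cs : List Char) (f : List Char → Int) : List Int :=
  (List.range (cs.length + 1)).map (fun j => f ((cs.take j).reverse))

lemma pv_set_append_length {α : Type} (pre : List α) (x y : α) (post : List α) :
    (pre ++ x :: post).set pre.length y = pre ++ y :: post := by
  induction pre with
  | nil => simp
  | cons p pre ih => simp [ih]

-- the first loop only rewrites row 0
lemma pv_fold_set0 (L : List Int) (r0 : List Int) (rest : List (List Int)) :
    L.foldl (fun dp i => pvSetRC dp 0 i 1) (r0 :: rest) =
      (L.foldl (fun r i => r.set i.toNat 1) r0) :: rest := by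
  induction L generalizing r0 with
  | nil => rfl
  | cons i L ih =>
      simp only [List.foldl_cons]
      rw [show pvSetRC (r0 :: rest) 0 i 1 = (r0.set i.toNat 1) :: rest from by
        simp [pvSetRC]]
      exact ih _

lemma pv_init_row (n : Nat) (k : Nat) (hk : k ≤ n + 1) :
    (PySem.List.pyRange 0 (k : Int) 1).foldl (fun r i => r.set i.toNat 1)
        (List.replicate (n + 1) (0 : Int)) =
      List.replicate k 1 ++ List.replicate (n + 1 - k) (0 : Int) := by
  induction k with
  | zero => simp [PySem.List.pyRange_one_eq_nil]
  | succ k ih =>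
      have hk' : k ≤ n + 1 := Nat.le_of_succ_le hk
      have hsplit : PySem.List.pyRange 0 ((k + 1 : Nat) : Int) 1 =
          PySem.List.pyRange 0 (k : Int) 1 ++ [(k : Int)] := by
        push_cast
        exact PySem.List.pyRange_one_succ_right (by positivity)
      rw [hsplit, List.foldl_append, ih hk']
      have hlen : (List.replicate k (1 : Int)).length = k := List.length_replicate
      have hrep : List.replicate (n + 1 - k) (0 : Int) =
          0 :: List.replicate (n + 1 - (k + 1)) (0 : Int) := by
        have : n + 1 - k = (n + 1 - (k + 1)) + 1 := by omega
        rw [this, List.replicate_succ]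
      simp only [List.foldl_cons, List.foldl_nil, Int.toNat_natCast, hrep]
      have hset := pv_set_append_length (List.replicate k (1 : Int)) 0 1
        (List.replicate (n + 1 - (k + 1)) (0 : Int))
      rw [hlen] at hset
      rw [hset,
        show List.replicate k (1 : Int) ++ 1 :: List.replicate (n + 1 - (k + 1)) (0 : Int) =
          (List.replicate k (1 : Int) ++ [1]) ++ List.replicate (n + 1 - (k + 1)) (0 : Int) from by
        simp,
        ← List.replicate_succ' (n := k) (a := (1 : Int))]

-- partial state of the inner loop: row ri after columns 1..k have been filled
def pvPartRow (cs : List Char) (g : List Char → Int) (k : Nat) : List Int :=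
  (List.range (k + 1)).map (fun j => g ((cs.take j).reverse)) ++
    List.replicate (cs.length - k) (0 : Int)

lemma pv_inner_partial (s t : String) (tc : Char) (f : List Char → Int)
    (pre post : List (List Int)) (ri : Nat) (hri : 1 ≤ ri) (hpre : pre.length = ri)
    (htc : PySem.Str.pyGet? t ((ri : Int) - 1) = some tc)
    (hprev : pre[ri - 1]? = some (pvRowOf s.toList f))
    (k : Nat) (hk : k ≤ s.toList.length) :
    (PySem.List.pyRange 1 ((k : Int) + 1) 1).foldl
        (fun dp j =>
          if PySem.Str.pyGet? s (j - 1) = PySem.Str.pyGet? t ((ri : Int) - 1) then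
            pvSetRC dp (ri : Int) j
              (pvGetRC dp ((ri : Int) - 1) (j - 1) + pvGetRC dp (ri : Int) (j - 1))
          else
            pvSetRC dp (ri : Int) j (pvGetRC dp (ri : Int) (j - 1)))
        (pre ++ List.replicate (s.toList.length + 1) (0 : Int) :: post)
      = pre ++ pvPartRow s.toList (pvNext f tc) k :: post := by
  induction k with
  | zero =>
      rw [PySem.List.pyRange_one_eq_nil (by norm_num), List.foldl_nil]
      have : pvPartRow s.toList (pvNext f tc) 0 =
          List.replicate (s.toList.length + 1) (0 : Int) := by
        simp [pvPartRow, pvNext, List.replicate_succ]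
      rw [this]
  | succ k ih =>
      have hk' : k ≤ s.toList.length := Nat.le_of_succ_le hk
      have hkn : k < s.toList.length := hk
      have hsplit : PySem.List.pyRange 1 (((k + 1 : Nat) : Int) + 1) 1 =
          PySem.List.pyRange 1 ((k : Int) + 1) 1 ++ [(k : Int) + 1] := by
        push_cast
        exact PySem.List.pyRange_one_succ_right (by omega)
      rw [hsplit, List.foldl_append, ih hk', List.foldl_cons, List.foldl_nil]
      have hidx : ((k : Int) + 1) - 1 = ((k : Nat) : Int) := by omega
      have hsk : PySem.Str.pyGet? s (((k : Int) + 1) - 1) = some (s.toList[k]'hkn) := by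
        rw [hidx, PySem.Str.pyGet?_natCast]
        exact List.getElem?_eq_getElem hkn
      have hri1 : ((ri : Int) - 1) = (((ri - 1 : Nat)) : Int) := by omega
      have hdpprev : PySem.List.pyGet?
          (pre ++ pvPartRow s.toList (pvNext f tc) k :: post) ((ri : Int) - 1) =
          some (pvRowOf s.toList f) := by
        rw [hri1, PySem.List.pyGet?_natCast, List.getElem?_append_left (by omega), hprev]
      have hdpcur : PySem.List.pyGet?
          (pre ++ pvPartRow s.toList (pvNext f tc) k :: post) (ri : Int) =
          some (pvPartRow s.toList (pvNext f tc) k) := by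
        rw [PySem.List.pyGet?_natCast, List.getElem?_append_right (by omega)]
        simp [hpre]
      have hgetprev : pvGetRC (pre ++ pvPartRow s.toList (pvNext f tc) k :: post)
          ((ri : Int) - 1) (((k : Int) + 1) - 1) = f ((s.toList.take k).reverse) := by
        rw [pvGetRC, hdpprev, Option.getD_some, hidx, PySem.List.pyGet?_natCast]
        rw [pvRowOf, List.getElem?_map,
          List.getElem?_range (by omega : k < s.toList.length + 1)]
        rfl
      have hgetcur : pvGetRC (pre ++ pvPartRow s.toList (pvNext f tc) k :: post)
          (ri : Int) (((k : Int) + 1) - 1) = pvNext f tc ((s.toList.take k).reverse) := by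
        rw [pvGetRC, hdpcur, Option.getD_some, hidx, PySem.List.pyGet?_natCast]
        rw [pvPartRow, List.getElem?_append_left (by simp), List.getElem?_map,
          List.getElem?_range (by omega : k < k + 1)]
        rfl
      have hk1 : ((k : Int) + 1) = (((k + 1 : Nat)) : Int) := by push_cast; ring
      have hrep : List.replicate (s.toList.length - k) (0 : Int) =
          0 :: List.replicate (s.toList.length - (k + 1)) (0 : Int) := by
        have : s.toList.length - k = (s.toList.length - (k + 1)) + 1 := by omega
        rw [this, List.replicate_succ]
      have htake : (s.toList.take (k + 1)).reverse =
          (s.toList[k]'hkn) :: (s.toList.take k).reverse := by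
        rw [List.take_add_one, List.getElem?_eq_getElem hkn]
        simp
      have hset : ∀ v : Int, v = pvNext f tc ((s.toList.take (k + 1)).reverse) →
          pvSetRC (pre ++ pvPartRow s.toList (pvNext f tc) k :: post)
            (ri : Int) ((k : Int) + 1) v =
          pre ++ pvPartRow s.toList (pvNext f tc) (k + 1) :: post := by
        intro v hv
        rw [pvSetRC, hdpcur, Option.getD_some, Int.toNat_natCast, hk1, Int.toNat_natCast]
        have hmap : ((List.range (k + 1)).map
            (fun j => pvNext f tc ((s.toList.take j).reverse))).length = k + 1 := by simp
        rw [pvPartRow, hrep]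
        have hsetrow := pv_set_append_length
          ((List.range (k + 1)).map (fun j => pvNext f tc ((s.toList.take j).reverse)))
          (0 : Int) v (List.replicate (s.toList.length - (k + 1)) (0 : Int))
        rw [hmap] at hsetrow
        rw [hsetrow]
        have hsetdp := pv_set_append_length pre
          (pvPartRow s.toList (pvNext f tc) k)
          ((List.range (k + 1)).map (fun j => pvNext f tc ((s.toList.take j).reverse)) ++
            v :: List.replicate (s.toList.length - (k + 1)) (0 : Int)) post
        rw [hpre] at hsetdp
        rw [pvPartRow, hrep] at hsetdp
        rw [hsetdp, hv, pvPartRow]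
        simp [List.range_succ, List.map_append]
      by_cases hc : s.toList[k]'hkn = tc
      · rw [if_pos (by rw [hsk, htc, hc])]
        rw [hgetprev, hgetcur]
        apply hset
        rw [htake]
        simp [pvNext, hc]
        ring
      · rw [if_neg (by rw [hsk, htc]; simp [hc])]
        rw [hgetcur]
        apply hset
        rw [htake]
        simp [pvNext, hc]
lemma pv_part_eq_row (s : String) (g : List Char → Int) :
    pvPartRow s.toList g s.toList.length = pvRowOf s.toList g := by
  simp [pvPartRow, pvRowOf]

lemma pv_row_getLast (s : String) (g : List Char → Int) :
    (pvRowOf s.toList g).getLast? = some (g s.toList.reverse) := by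
  rw [pvRowOf, List.range_succ]
  simp only [List.map_append, List.map_cons, List.map_nil, List.getLast?_concat,
    List.take_length]

lemma pvA_val (s : String) (a b c : Char) (t : String) (ht : t.toList = [a, b, c]) :
    pvNumDistinct s t = pvCnt3 a b c s.toList.reverse := by
  have hlt : PySem.Str.len t = 3 := by rw [PySem.Str.len_eq, ht]; rfl
  have hls : PySem.Str.len s = (s.toList.length : Int) := PySem.Str.len_eq s
  have hr4 : PySem.List.pyRange 0 (3 + 1) 1 = [0, 1, 2, 3] := by decide
  have hr13 : PySem.List.pyRange 1 (3 + 1) 1 = [1, 2, 3] := by decide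
  have hta : PySem.Str.pyGet? t (((1 : Nat) : Int) - 1) = some a := by
    rw [show ((1 : Nat) : Int) - 1 = ((0 : Nat) : Int) from by norm_num,
      PySem.Str.pyGet?_natCast, ht]; rfl
  have htb : PySem.Str.pyGet? t (((2 : Nat) : Int) - 1) = some b := by
    rw [show ((2 : Nat) : Int) - 1 = ((1 : Nat) : Int) from by norm_num,
      PySem.Str.pyGet?_natCast, ht]; rfl
  have htc : PySem.Str.pyGet? t (((3 : Nat) : Int) - 1) = some c := by
    rw [show ((3 : Nat) : Int) - 1 = ((2 : Nat) : Int) from by norm_num,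
      PySem.Str.pyGet?_natCast, ht]; rfl
  have hones : List.replicate (s.toList.length + 1) (1 : Int) = pvRowOf s.toList pvOne := by
    simp [pvRowOf, pvOne]
  rw [pvNumDistinct]
  simp only [hlt, hls, hr4, hr13, List.map_cons, List.map_nil]
  -- the init loop fills row 0 with ones
  rw [pv_fold_set0,
    show ((s.toList.length : Int) + 1) = (((s.toList.length + 1 : Nat)) : Int) from by
      push_cast; ring,
    pv_init_row s.toList.length (s.toList.length + 1) (le_refl _)]
  simp only [Nat.sub_self, List.replicate_zero, List.append_nil, hones]
  -- unroll the outer loop (rows 1, 2, 3)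
  simp only [List.foldl_cons, List.foldl_nil]
  have h1 := pv_inner_partial s t a pvOne
    [pvRowOf s.toList pvOne]
    [List.replicate (s.toList.length + 1) (0 : Int),
     List.replicate (s.toList.length + 1) (0 : Int)]
    1 (le_refl _) rfl hta rfl s.toList.length (le_refl _)
  have h2 := pv_inner_partial s t b (pvCnt1 a)
    [pvRowOf s.toList pvOne, pvRowOf s.toList (pvCnt1 a)]
    [List.replicate (s.toList.length + 1) (0 : Int)]
    2 (by norm_num) rfl htb rfl s.toList.length (le_refl _)
  have h3 := pv_inner_partial s t c (pvCnt2 a b)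
    [pvRowOf s.toList pvOne, pvRowOf s.toList (pvCnt1 a), pvRowOf s.toList (pvCnt2 a b)]
    [] 3 (by norm_num) rfl htc rfl s.toList.length (le_refl _)
  rw [pv_part_eq_row] at h1 h2 h3
  push_cast
  simp only [List.cons_append, List.nil_append] at h1 h2 h3
  push_cast at h1 h2 h3
  simp only [pvCnt1, pvCnt2] at h1 h2 h3
  rw [h1, h2, h3]
  -- dp[-1][-1]
  rw [pvGetRC,
    show (PySem.List.pyGet? [pvRowOf s.toList pvOne, pvRowOf s.toList (pvNext pvOne a),
        pvRowOf s.toList (pvNext (pvNext pvOne a) b),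
        pvRowOf s.toList (pvNext (pvNext (pvNext pvOne a) b) c)] (-1)) =
      some (pvRowOf s.toList (pvNext (pvNext (pvNext pvOne a) b) c)) from by
      rw [PySem.List.pyGet?_neg_one]; simp,
    Option.getD_some, PySem.List.pyGet?_neg_one, pv_row_getLast, Option.getD_some]
  rfl


theorem pv_main (s : String) : numberOfWays s = numberOfWays_alt s := by
  rw [pvB_val, numberOfWays,
    pvA_val s '0' '1' '0' "010" (by decide),
    pvA_val s '1' '0' '1' "101" (by decide)]

-- ===== VERDICT (by name: the statement is the Claim_ definition above) =====
theorem numberOfWays_spec : Claim_equal_numberOfWays := by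
  intro s _
  unfold Spec_numberOfWays
  exact pv_main s
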